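-- pv_equiv track=rewrite | github.com/takashi-chikayama/software-for-SamurAI-Coding-2018-19 | course_generator/course_generator.py | block_goback
-- ===== SOURCE A (Python) =====
-- def paint_block(x, y, w, d, block, visited):
--     if (not (0 <= x < w and 0 <= y < d)):
--         return
--     if block[y][x] == 1 or visited[y][x]:
--         return
--     visited[y][x] = True
--     for dx, dy in ((1, 0), (0, 1), (-1, 0), (0, -1)):
--         paint_block(x + dx, y + dy, w, d, block, visited)
--
-- def block_goback(block):
--     h = len(block)
--     w = len(block[0])
--     rblock = list(reversed(block))
--     mins = [[-1] * w for i in range(h)]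
--     need_v = 0
--     for ylimit in range(1, h):
--         visited = [[False] * w for i in range(ylimit)]
--         for x in range(w):
--             paint_block(x, 0, w, ylimit, rblock, visited)
--         for y in range(ylimit):
--             for x in range(w):
--                 if visited[y][x] and mins[y][x] < 0:
--                     mins[y][x] = ylimit
--                     need_v = max(need_v, ylimit - y + 1)
--     return need_v
-- ===== SOURCE B (Python) =====
-- def block_goback(block):
--     h = len(block)
--     w = len(block[0])
--     rblock = block[::-1]
--     visited = [[False] * w for _ in range(h - 1)]
--     need_v = 0
--     for t in range(h - 1):
--         if t == 0:
--             stack = [(x, 0) for x in range(w)]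
--         else:
--             stack = [(x, t) for x in range(w) if visited[t - 1][x]]
--         while stack:
--             x, y = stack.pop()
--             if not (0 <= x < w and 0 <= y <= t):
--                 continue
--             if rblock[y][x] == 1 or visited[y][x]:
--                 continue
--             visited[y][x] = True
--             need_v = max(need_v, t + 2 - y)
--             stack.extend(((x + 1, y), (x, y + 1), (x - 1, y), (x, y - 1)))
--     return need_v
-- ===== Notes on version B (the rewrite author's own statement) =====
-- stated objective: faster
-- what changed: replaces A's per-ylimit from-scratch recursive flood fills plus full-grid rescans with a single incremental explicit-stack flood fill that seeds each newly opened row from the row below it and updates the maximum when a cell is first visited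
-- outside the precondition, e.g. on block_goback([[0, 0], [1], [1, 1]]): A returns 0, B returns 0
import Mathlib
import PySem

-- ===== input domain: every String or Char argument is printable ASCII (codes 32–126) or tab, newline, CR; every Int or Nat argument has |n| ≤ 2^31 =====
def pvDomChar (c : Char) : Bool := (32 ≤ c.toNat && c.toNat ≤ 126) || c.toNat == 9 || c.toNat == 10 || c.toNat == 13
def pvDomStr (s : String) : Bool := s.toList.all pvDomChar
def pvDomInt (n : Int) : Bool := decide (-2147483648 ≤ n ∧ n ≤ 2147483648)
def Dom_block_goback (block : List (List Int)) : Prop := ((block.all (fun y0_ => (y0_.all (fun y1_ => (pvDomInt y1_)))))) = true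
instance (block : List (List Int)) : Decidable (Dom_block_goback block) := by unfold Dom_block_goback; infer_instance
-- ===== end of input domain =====

-- B replaces A's per-ylimit from-scratch recursive flood fills and full-grid rescans by ONE
-- incremental stack-based flood fill that seeds each newly opened row from the row below it
-- and updates the maximum as cells are first visited (objective: faster).

-- shared direction table (Python's ((1,0),(0,1),(-1,0),(0,-1)))
def pvDirs : List (Int × Int) := [(1, 0), (0, 1), (-1, 0), (0, -1)]

-- cell access rblock[y][x]; exact under the guards 0 ≤ x < w, 0 ≤ y and Pre_ (rows long enough)
def pvCell (g : List (List Int)) (x y : Int) : Int :=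
  (g.getD y.toNat []).getD x.toNat 0

-- ===== PORT A =====
-- paint_block: recursive DFS; fuel only makes the recursion structural (never exhausted on Pre_)
def paintA (g : List (List Int)) (w d : Int) : Nat → Int → Int → (Int → Int → Bool) → (Int → Int → Bool)
  | 0, _, _, v => v
  | fuel + 1, x, y, v =>
    if ¬(0 ≤ x ∧ x < w ∧ 0 ≤ y ∧ y < d) then v
    else if pvCell g x y = 1 ∨ v x y = true then v
    else
      let v1 : Int → Int → Bool := fun a b => decide (a = x ∧ b = y) || v a b
      pvDirs.foldl (fun vv dd => paintA g w d fuel (x + dd.1) (y + dd.2) vv) v1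

def block_goback (block : List (List Int)) : Int :=
  let h : Int := block.length
  let w : Int := (block.headD []).length   -- block[0]; Pre_ excludes the empty list
  let rblock := block.reverse
  let fuel : Nat := w.toNat * h.toNat + 1
  let res := (PySem.List.pyRange 1 h 1).foldl
    (fun (st : (Int → Int → Int) × Int) ylimit =>
      let visited := (PySem.List.pyRange 0 w 1).foldl
        (fun v x => paintA rblock w ylimit fuel x 0 v) (fun _ _ => false)
      (PySem.List.pyRange 0 ylimit 1).foldl
        (fun st2 y => (PySem.List.pyRange 0 w 1).foldl
          (fun (st3 : (Int → Int → Int) × Int) x =>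
            if visited x y = true ∧ st3.1 y x < 0 then
              ((fun b a => if b = y ∧ a = x then ylimit else st3.1 b a),
               max st3.2 (ylimit - y + 1))
            else st3) st2) st)
    ((fun _ _ => (-1 : Int)), (0 : Int))
  res.2

-- ===== PORT B =====
-- the while-stack loop of Source B; state = (visited, need_v); fuel only makes it structural
def fillB (g : List (List Int)) (w t : Int) : Nat → List (Int × Int) → ((Int → Int → Bool) × Int) → ((Int → Int → Bool) × Int)
  | 0, _, st => st
  | _ + 1, [], st => st
  | fuel + 1, (x, y) :: rest, (v, need) =>
    if ¬(0 ≤ x ∧ x < w ∧ 0 ≤ y ∧ y ≤ t) then fillB g w t fuel rest (v, need)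
    else if pvCell g x y = 1 ∨ v x y = true then fillB g w t fuel rest (v, need)
    else
      let v1 : Int → Int → Bool := fun a b => decide (a = x ∧ b = y) || v a b
      fillB g w t fuel (pvDirs.map (fun dd => (x + dd.1, y + dd.2)) ++ rest)
        (v1, max need (t + 2 - y))

def block_goback_alt (block : List (List Int)) : Int :=
  let h : Int := block.length
  let w : Int := (block.headD []).length   -- block[0]; Pre_ excludes the empty list
  let rblock := block.reverse              -- block[::-1]
  let fuel : Nat := 5 * (w.toNat * h.toNat) + w.toNat + 1
  let res := (PySem.List.pyRange 0 (h - 1) 1).foldl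
    (fun (st : (Int → Int → Bool) × Int) t =>
      let stack := if t = 0 then (PySem.List.pyRange 0 w 1).map (fun x => (x, (0 : Int)))
        else ((PySem.List.pyRange 0 w 1).filter (fun x => st.1 x (t - 1))).map (fun x => (x, t))
      fillB rblock w t fuel stack st)
    ((fun _ _ => false), (0 : Int))
  res.2

-- ===== PRECONDITION & SPEC =====
-- Pre_ excludes the empty list (block[0] raises IndexError) and ragged inputs whose tail rows are
-- shorter than the first row, on which A's flood fill may raise IndexError (on a few such inputs
-- the short rows are walled off by 1-cells and A still returns; those are excluded too).
def Pre_block_goback (block : List (List Int)) : Prop :=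
  block ≠ [] ∧ ∀ row ∈ block.tail, (block.headD []).length ≤ row.length
instance (block : List (List Int)) : Decidable (Pre_block_goback block) := by
  unfold Pre_block_goback; infer_instance

def pvWitness_block_goback : List (List Int) := [[0, 0], [1, 0]]

def Spec_block_goback (block : List (List Int)) (out : Int) : Prop := out = block_goback_alt block
instance (block : List (List Int)) (out : Int) : Decidable (Spec_block_goback block out) := by
  unfold Spec_block_goback; infer_instance

-- ===== CLAIM (what is proved, stated in full; the proofs are below) =====
def Claim_equal_block_goback : Prop := ∀ (block : List (List Int)), Dom_block_goback block → Pre_block_goback block → Spec_block_goback block (block_goback block)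

-- ===== LEMMAS AND PROOFS =====

-- ---------- spec-side notions ----------

-- in-grid-and-free cell (bounds 0 ≤ x < w, 0 ≤ y < d, not a block)
def pvGF (g : List (List Int)) (w d : Int) (x y : Int) : Prop :=
  (0 ≤ x ∧ x < w ∧ 0 ≤ y ∧ y < d) ∧ pvCell g x y ≠ 1

-- additionally not yet visited
def pvOk (g : List (List Int)) (w d : Int) (v : Int → Int → Bool) (x y : Int) : Prop :=
  pvGF g w d x y ∧ v x y = false

-- reachability through ok-cells by unit steps
inductive pvRF (ok : Int → Int → Prop) (x y : Int) : Int → Int → Prop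
  | refl : ok x y → pvRF ok x y x y
  | step (a b : Int) (dd : Int × Int) : pvRF ok x y a b → dd ∈ pvDirs →
      ok (a + dd.1) (b + dd.2) → pvRF ok x y (a + dd.1) (b + dd.2)

def pvBot : Int → Int → Bool := fun _ _ => false

-- cells reachable from the (rblock-)top row staying in rows < L
def pvReach (g : List (List Int)) (w L : Int) (a b : Int) : Prop :=
  ∃ s : Int, (0 ≤ s ∧ s < w) ∧ pvRF (pvOk g w L pvBot) s 0 a b

def pvVLE (u v : Int → Int → Bool) : Prop := ∀ a b, u a b = true → v a b = true

def pvCellsF (w d : Int) : Finset (Int × Int) :=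
  ((PySem.List.pyRange 0 w 1) ×ˢ (PySem.List.pyRange 0 d 1)).toFinset

theorem pvCellsF_mem {w d : Int} {c : Int × Int} :
    c ∈ pvCellsF w d ↔ (0 ≤ c.1 ∧ c.1 < w ∧ 0 ≤ c.2 ∧ c.2 < d) := by
  obtain ⟨a, b⟩ := c
  simp only [pvCellsF, List.mem_toFinset, List.mem_product, PySem.List.mem_pyRange_one]
  tauto

-- number of unvisited grid cells (the fuel measure)
def pvM (w d : Int) (v : Int → Int → Bool) : Nat :=
  ((pvCellsF w d).filter (fun c => v c.1 c.2 = false)).card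

theorem pvVLE_refl (v : Int → Int → Bool) : pvVLE v v := fun _ _ h => h

theorem pvVLE_trans {u v w : Int → Int → Bool} (h1 : pvVLE u v) (h2 : pvVLE v w) : pvVLE u w :=
  fun a b h => h2 a b (h1 a b h)

theorem pvRF_mono {ok1 ok2 : Int → Int → Prop} (hok : ∀ x y, ok1 x y → ok2 x y)
    {x y a b : Int} (h : pvRF ok1 x y a b) : pvRF ok2 x y a b := by
  induction h with
  | refl h => exact pvRF.refl (hok _ _ h)
  | step a b dd _ hd ho ih => exact pvRF.step a b dd ih hd (hok _ _ ho)

theorem pvRF_target {ok : Int → Int → Prop} {x y a b : Int} (h : pvRF ok x y a b) : ok a b := by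
  cases h with
  | refl h => exact h
  | step _ _ _ _ _ ho => exact ho

theorem pvRF_source {ok : Int → Int → Prop} {x y a b : Int} (h : pvRF ok x y a b) : ok x y := by
  induction h with
  | refl h => exact h
  | step _ _ _ _ _ _ ih => exact ih

theorem pvRF_trans {ok : Int → Int → Prop} {x y a b c d : Int}
    (h1 : pvRF ok x y a b) (h2 : pvRF ok a b c d) : pvRF ok x y c d := by
  induction h2 with
  | refl _ => exact h1
  | step p q dd h hd ho ih => exact pvRF.step p q dd ih hd ho

-- prepend one step in front of a reachability derivation
theorem pvRF_graft {ok : Int → Int → Prop} {x y a b : Int} (dd : Int × Int)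
    (hxy : ok x y) (hd : dd ∈ pvDirs)
    (h : pvRF ok (x + dd.1) (y + dd.2) a b) : pvRF ok x y a b := by
  induction h with
  | refl h => exact pvRF.step x y dd (pvRF.refl hxy) hd h
  | step r s dd2 h hd2 ho ih => exact pvRF.step r s dd2 ih hd2 ho

theorem pvOk_mono {g : List (List Int)} {w d : Int} {u v : Int → Int → Bool}
    (h : pvVLE u v) : ∀ x y, pvOk g w d v x y → pvOk g w d u x y := by
  intro x y ⟨hgf, hv⟩
  refine ⟨hgf, ?_⟩
  cases hu : u x y
  · rfl
  · exact absurd (h x y hu) (by simp [hv])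

theorem pvOk_bot {g : List (List Int)} {w d : Int} {v : Int → Int → Bool} :
    ∀ x y, pvOk g w d v x y → pvOk g w d pvBot x y := by
  intro x y ⟨hgf, _⟩; exact ⟨hgf, rfl⟩

theorem pvM_le_of_VLE {w d : Int} {u v : Int → Int → Bool} (h : pvVLE u v) :
    pvM w d v ≤ pvM w d u := by
  apply Finset.card_le_card
  intro c hc
  simp only [pvM, Finset.mem_filter] at hc ⊢
  refine ⟨hc.1, ?_⟩
  cases hu : u c.1 c.2
  · rfl
  · exact absurd (h _ _ hu) (by simp [hc.2])

theorem pvM_mark {w d : Int} {v : Int → Int → Bool} {x y : Int}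
    (hmem : (x, y) ∈ pvCellsF w d) (hv : v x y = false) :
    pvM w d (fun a b => decide (a = x ∧ b = y) || v a b) + 1 = pvM w d v := by
  classical
  have hxy : (x, y) ∈ (pvCellsF w d).filter (fun c => v c.1 c.2 = false) := by
    simp [Finset.mem_filter, hmem, hv]
  have herase :
      (pvCellsF w d).filter (fun c => (decide (c.1 = x ∧ c.2 = y) || v c.1 c.2) = false)
        = ((pvCellsF w d).filter (fun c => v c.1 c.2 = false)).erase (x, y) := by
    ext c
    simp only [Finset.mem_filter, Finset.mem_erase, Bool.or_eq_false_iff, decide_eq_false_iff_not]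
    constructor
    · rintro ⟨hc, hne, hvc⟩
      refine ⟨?_, hc, hvc⟩
      intro hceq; exact hne (by cases hceq; exact ⟨rfl, rfl⟩)
    · rintro ⟨hne, hc, hvc⟩
      refine ⟨hc, ?_, hvc⟩
      rintro ⟨h1, h2⟩; exact hne (Prod.ext h1 h2)
  unfold pvM
  rw [herase, Finset.card_erase_of_mem hxy]
  have : 0 < ((pvCellsF w d).filter (fun c => v c.1 c.2 = false)).card :=
    Finset.card_pos.mpr ⟨(x, y), hxy⟩
  omega

theorem pvM_le {w d : Int} (v : Int → Int → Bool) : pvM w d v ≤ w.toNat * d.toNat := by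
  calc pvM w d v ≤ (pvCellsF w d).card := Finset.card_filter_le _ _
    _ ≤ ((PySem.List.pyRange 0 w 1) ×ˢ (PySem.List.pyRange 0 d 1)).length :=
        List.toFinset_card_le _
    _ = w.toNat * d.toNat := by
        simp [List.length_product, PySem.List.length_pyRange_one]


theorem block_goback_witness_ok :
    Dom_block_goback pvWitness_block_goback ∧ Pre_block_goback pvWitness_block_goback := by
  constructor <;> decide


-- ---------- paintA (A's recursive flood fill) ----------

theorem paintA_succ_guard (g : List (List Int)) (w d : Int) (n : Nat) (x y : Int)
    (v : Int → Int → Bool) (h1 : ¬(0 ≤ x ∧ x < w ∧ 0 ≤ y ∧ y < d)) :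
    paintA g w d (n + 1) x y v = v := by
  simp only [paintA]; rw [if_pos h1]

theorem paintA_succ_stop (g : List (List Int)) (w d : Int) (n : Nat) (x y : Int)
    (v : Int → Int → Bool) (h1 : 0 ≤ x ∧ x < w ∧ 0 ≤ y ∧ y < d)
    (h2 : pvCell g x y = 1 ∨ v x y = true) :
    paintA g w d (n + 1) x y v = v := by
  simp only [paintA]; rw [if_neg (by tauto), if_pos h2]

theorem paintA_succ_mark (g : List (List Int)) (w d : Int) (n : Nat) (x y : Int)
    (v : Int → Int → Bool) (h1 : 0 ≤ x ∧ x < w ∧ 0 ≤ y ∧ y < d)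
    (h2 : ¬(pvCell g x y = 1 ∨ v x y = true)) :
    paintA g w d (n + 1) x y v =
      pvDirs.foldl (fun vv dd => paintA g w d n (x + dd.1) (y + dd.2) vv)
        (fun a b => decide (a = x ∧ b = y) || v a b) := by
  simp only [paintA]; rw [if_neg (by tauto), if_neg h2]

theorem paintA_foldl_mono (g : List (List Int)) (w d : Int) (n : Nat)
    (IH : ∀ x y v, pvVLE v (paintA g w d n x y v)) (x y : Int) :
    ∀ (l : List (Int × Int)) (v : Int → Int → Bool),
      pvVLE v (l.foldl (fun vv dd => paintA g w d n (x + dd.1) (y + dd.2) vv) v) := by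
  intro l
  induction l with
  | nil => intro v; exact pvVLE_refl v
  | cons dd l ih =>
      intro v
      exact pvVLE_trans (IH (x + dd.1) (y + dd.2) v) (ih _)

theorem paintA_mono (g : List (List Int)) (w d : Int) :
    ∀ (fuel : Nat) (x y : Int) (v : Int → Int → Bool), pvVLE v (paintA g w d fuel x y v) := by
  intro fuel
  induction fuel with
  | zero => intro x y v; exact pvVLE_refl v
  | succ n ih =>
      intro x y v
      by_cases h1 : 0 ≤ x ∧ x < w ∧ 0 ≤ y ∧ y < d
      · by_cases h2 : pvCell g x y = 1 ∨ v x y = true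
        · rw [paintA_succ_stop g w d n x y v h1 h2]; exact pvVLE_refl v
        · rw [paintA_succ_mark g w d n x y v h1 h2]
          exact pvVLE_trans (fun a b hab => by simp [hab])
            (paintA_foldl_mono g w d n ih x y pvDirs _)
      · rw [paintA_succ_guard g w d n x y v h1]; exact pvVLE_refl v

theorem paintA_sound (g : List (List Int)) (w d : Int) :
    ∀ (fuel : Nat) (x y : Int) (v : Int → Int → Bool) (a b : Int),
      paintA g w d fuel x y v a b = true →
      v a b = true ∨ pvRF (pvOk g w d v) x y a b := by
  intro fuel
  induction fuel with
  | zero => intro x y v a b h; exact Or.inl h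
  | succ n ih =>
      intro x y v a b h
      by_cases h1 : 0 ≤ x ∧ x < w ∧ 0 ≤ y ∧ y < d
      · by_cases h2 : pvCell g x y = 1 ∨ v x y = true
        · rw [paintA_succ_stop g w d n x y v h1 h2] at h; exact Or.inl h
        · rw [paintA_succ_mark g w d n x y v h1 h2] at h
          push_neg at h2
          have hok : pvOk g w d v x y :=
            ⟨⟨h1, h2.1⟩, by cases hv : v x y; rfl; exact absurd hv (by simpa using h2.2)⟩
          have aux : ∀ (l : List (Int × Int)), (∀ dd ∈ l, dd ∈ pvDirs) →
              ∀ (vv : Int → Int → Bool), pvVLE v vv →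
              (∀ p q, vv p q = true → v p q = true ∨ pvRF (pvOk g w d v) x y p q) →
              ∀ p q, (l.foldl (fun vv dd => paintA g w d n (x + dd.1) (y + dd.2) vv) vv) p q = true →
                v p q = true ∨ pvRF (pvOk g w d v) x y p q := by
            intro l
            induction l with
            | nil => intro _ vv _ hint p q hpq; exact hint p q hpq
            | cons dd l ihl =>
                intro hl vv hvle hint p q hpq
                refine ihl (fun d hd => hl d (List.mem_cons_of_mem dd hd))
                  (paintA g w d n (x + dd.1) (y + dd.2) vv)
                  (pvVLE_trans hvle (paintA_mono g w d n _ _ vv)) ?_ p q hpq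
                intro p q hpq'
                rcases ih (x + dd.1) (y + dd.2) vv p q hpq' with hvv | hrf
                · exact hint p q hvv
                · exact Or.inr (pvRF_graft dd hok (hl dd List.mem_cons_self)
                    (pvRF_mono (pvOk_mono hvle) hrf))
          refine aux pvDirs (fun _ hd => hd) _ (fun p q hpq => by simp [hpq]) ?_ a b h
          intro p q hpq
          simp only [Bool.or_eq_true, decide_eq_true_eq] at hpq
          rcases hpq with ⟨hp, hq⟩ | hv
          · subst hp; subst hq; exact Or.inr (pvRF.refl hok)
          · exact Or.inl hv
      · rw [paintA_succ_guard g w d n x y v h1] at h; exact Or.inl h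

theorem paintA_start (g : List (List Int)) (w d : Int) (fuel : Nat) (x y : Int)
    (v : Int → Int → Bool) (hf : 1 ≤ fuel) (hgf : pvGF g w d x y) :
    paintA g w d fuel x y v x y = true := by
  obtain ⟨n, rfl⟩ : ∃ n, fuel = n + 1 := ⟨fuel - 1, by omega⟩
  by_cases h2 : pvCell g x y = 1 ∨ v x y = true
  · rcases h2 with hc | hv
    · exact absurd hc hgf.2
    · rw [paintA_succ_stop g w d n x y v hgf.1 (Or.inr hv)]; exact hv
  · rw [paintA_succ_mark g w d n x y v hgf.1 h2]
    exact paintA_foldl_mono g w d n (paintA_mono g w d n) x y pvDirs _ x y (by simp)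

theorem paintA_closed (g : List (List Int)) (w d : Int) :
    ∀ (fuel : Nat) (x y : Int) (v : Int → Int → Bool), pvM w d v + 1 ≤ fuel →
      ∀ a b, paintA g w d fuel x y v a b = true →
        v a b = true ∨ ∀ dd ∈ pvDirs, pvGF g w d (a + dd.1) (b + dd.2) →
          paintA g w d fuel x y v (a + dd.1) (b + dd.2) = true := by
  intro fuel
  induction fuel with
  | zero => intro x y v hf a b h; exact Or.inl h
  | succ n ih =>
      intro x y v hf a b h
      by_cases h1 : 0 ≤ x ∧ x < w ∧ 0 ≤ y ∧ y < d
      · by_cases h2 : pvCell g x y = 1 ∨ v x y = true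
        · rw [paintA_succ_stop g w d n x y v h1 h2] at h ⊢; exact Or.inl h
        · rw [paintA_succ_mark g w d n x y v h1 h2] at h ⊢
          push_neg at h2
          have hv : v x y = false := by
            cases hv : v x y; rfl; exact absurd hv (by simpa using h2.2)
          have hmem : (x, y) ∈ pvCellsF w d := pvCellsF_mem.mpr (by tauto)
          have hM1 : pvM w d (fun a b => decide (a = x ∧ b = y) || v a b) + 1 = pvM w d v :=
            pvM_mark hmem hv
          have hfuel1 : pvM w d (fun a b => decide (a = x ∧ b = y) || v a b) + 1 ≤ n := by omega
          have aux_closed : ∀ (l : List (Int × Int)) (vv : Int → Int → Bool),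
              pvM w d vv + 1 ≤ n →
              ∀ p q, (l.foldl (fun vv dd => paintA g w d n (x + dd.1) (y + dd.2) vv) vv) p q = true →
                vv p q = true ∨ ∀ dd ∈ pvDirs, pvGF g w d (p + dd.1) (q + dd.2) →
                  (l.foldl (fun vv dd => paintA g w d n (x + dd.1) (y + dd.2) vv) vv) (p + dd.1) (q + dd.2) = true := by
            intro l
            induction l with
            | nil => intro vv _ p q hpq; exact Or.inl hpq
            | cons dd0 l ihl =>
                intro vv hMvv p q hpq
                simp only [List.foldl_cons] at hpq ⊢
                have hMvv' : pvM w d (paintA g w d n (x + dd0.1) (y + dd0.2) vv) + 1 ≤ n :=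
                  le_trans (by
                    have := pvM_le_of_VLE (w := w) (d := d) (paintA_mono g w d n (x + dd0.1) (y + dd0.2) vv)
                    omega) hMvv
                rcases ihl _ hMvv' p q hpq with hvv' | hclosed
                · rcases ih (x + dd0.1) (y + dd0.2) vv hMvv p q hvv' with hvv | hcl
                  · exact Or.inl hvv
                  · refine Or.inr (fun dd hdd hgf => ?_)
                    exact paintA_foldl_mono g w d n (paintA_mono g w d n) x y l _
                      (p + dd.1) (q + dd.2) (hcl dd hdd hgf)
                · exact Or.inr hclosed
          have aux_start : ∀ (l : List (Int × Int)) (vv : Int → Int → Bool),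
              ∀ dd ∈ l, pvGF g w d (x + dd.1) (y + dd.2) →
                (l.foldl (fun vv dd => paintA g w d n (x + dd.1) (y + dd.2) vv) vv) (x + dd.1) (y + dd.2) = true := by
            intro l
            induction l with
            | nil => intro vv dd hdd; exact absurd hdd (List.not_mem_nil)
            | cons dd0 l ihl =>
                intro vv dd hdd hgf
                simp only [List.foldl_cons]
                rcases List.mem_cons.mp hdd with rfl | hdd'
                · exact paintA_foldl_mono g w d n (paintA_mono g w d n) x y l _ _ _
                    (paintA_start g w d n (x + dd.1) (y + dd.2) vv (by omega) hgf)
                · exact ihl _ dd hdd' hgf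
          rcases aux_closed pvDirs _ hfuel1 a b h with hv1 | hclosed
          · simp only [Bool.or_eq_true, decide_eq_true_eq] at hv1
            rcases hv1 with ⟨hp, hq⟩ | hvab
            · subst hp; subst hq
              refine Or.inr (fun dd hdd hgf => ?_)
              exact aux_start pvDirs _ dd hdd hgf
            · exact Or.inl hvab
          · exact Or.inr hclosed
      · rw [paintA_succ_guard g w d n x y v h1] at h ⊢; exact Or.inl h

-- ---------- characterization of A's per-ylimit flood fill ----------

theorem pvReach_bounds {g : List (List Int)} {w L a b : Int} (h : pvReach g w L a b) :
    0 ≤ a ∧ a < w ∧ 0 ≤ b ∧ b < L := by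
  obtain ⟨s, _, hrf⟩ := h
  exact (pvRF_target hrf).1.1

theorem pvReach_mono {g : List (List Int)} {w L L' a b : Int} (hLL : L ≤ L')
    (h : pvReach g w L a b) : pvReach g w L' a b := by
  obtain ⟨s, hs, hrf⟩ := h
  refine ⟨s, hs, pvRF_mono ?_ hrf⟩
  rintro x y ⟨⟨hb, hc⟩, _⟩
  exact ⟨⟨by omega, hc⟩, rfl⟩

theorem pvReach_zero {g : List (List Int)} {w a b : Int} (h : pvReach g w 0 a b) : False := by
  have := pvReach_bounds h; omega

def pvClosedV (g : List (List Int)) (w L : Int) (v : Int → Int → Bool) : Prop :=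
  ∀ p q, v p q = true → ∀ dd ∈ pvDirs, pvGF g w L (p + dd.1) (q + dd.2) →
    v (p + dd.1) (q + dd.2) = true

theorem foldA_sound (g : List (List Int)) (w L : Int) (fuel : Nat) :
    ∀ (l : List Int) (v : Int → Int → Bool),
      (∀ x ∈ l, 0 ≤ x ∧ x < w) →
      (∀ a b, v a b = true → pvReach g w L a b) →
      ∀ a b, (l.foldl (fun v x => paintA g w L fuel x 0 v) v) a b = true →
        pvReach g w L a b := by
  intro l
  induction l with
  | nil => intro v _ hint a b h; exact hint a b h
  | cons x l ihl =>
      intro v hl hint a b h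
      simp only [List.foldl_cons] at h
      refine ihl _ (fun s hs => hl s (List.mem_cons_of_mem x hs)) ?_ a b h
      intro p q hpq
      rcases paintA_sound g w L fuel x 0 v p q hpq with hv | hrf
      · exact hint p q hv
      · exact ⟨x, hl x List.mem_cons_self, pvRF_mono pvOk_bot hrf⟩

theorem foldA_complete (g : List (List Int)) (w L : Int) (fuel : Nat)
    (hfuel : w.toNat * L.toNat + 1 ≤ fuel) :
    ∀ (l : List Int) (v : Int → Int → Bool), pvClosedV g w L v →
      pvClosedV g w L (l.foldl (fun v x => paintA g w L fuel x 0 v) v)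
      ∧ pvVLE v (l.foldl (fun v x => paintA g w L fuel x 0 v) v)
      ∧ ∀ s ∈ l, ∀ a b, pvRF (pvOk g w L pvBot) s 0 a b →
          (l.foldl (fun v x => paintA g w L fuel x 0 v) v) a b = true := by
  have hfM : ∀ v : Int → Int → Bool, pvM w L v + 1 ≤ fuel := by
    intro v
    have := pvM_le (w := w) (d := L) v
    omega
  have hpres : ∀ (x : Int) (v : Int → Int → Bool), pvClosedV g w L v →
      pvClosedV g w L (paintA g w L fuel x 0 v) := by
    intro x v hcl p q hpq dd hdd hgf
    rcases paintA_closed g w L fuel x 0 v (hfM v) p q hpq with hv | hcl'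
    · exact paintA_mono g w L fuel x 0 v _ _ (hcl p q hv dd hdd hgf)
    · exact hcl' dd hdd hgf
  have hsingle : ∀ (x : Int) (v : Int → Int → Bool), pvClosedV g w L v →
      ∀ a b, pvRF (pvOk g w L pvBot) x 0 a b → (paintA g w L fuel x 0 v) a b = true := by
    intro x v hcl a b hrf
    induction hrf with
    | refl hok => exact paintA_start g w L fuel x 0 v (by omega) hok.1
    | step p q dd h hdd hok ih => exact hpres x v hcl p q ih dd hdd hok.1
  intro l
  induction l with
  | nil =>
      intro v hcl
      exact ⟨hcl, pvVLE_refl v, fun s hs => absurd hs (List.not_mem_nil)⟩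
  | cons x l ihl =>
      intro v hcl
      obtain ⟨hcl', hvle', hseeds'⟩ := ihl (paintA g w L fuel x 0 v) (hpres x v hcl)
      simp only [List.foldl_cons]
      refine ⟨hcl', pvVLE_trans (paintA_mono g w L fuel x 0 v) hvle', ?_⟩
      intro s hs a b hrf
      rcases List.mem_cons.mp hs with rfl | hs'
      · exact hvle' a b (hsingle s v hcl a b hrf)
      · exact hseeds' s hs' a b hrf

theorem foldA_charac (g : List (List Int)) (w L : Int) (fuel : Nat)
    (hfuel : w.toNat * L.toNat + 1 ≤ fuel) (a b : Int) :
    ((PySem.List.pyRange 0 w 1).foldl (fun v x => paintA g w L fuel x 0 v) pvBot) a b = true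
      ↔ pvReach g w L a b := by
  constructor
  · refine foldA_sound g w L fuel _ pvBot (fun x hx => ?_) (fun p q h => ?_) a b
    · have := (PySem.List.mem_pyRange_one).mp hx; omega
    · simp [pvBot] at h
  · rintro ⟨s, hs, hrf⟩
    refine (foldA_complete g w L fuel hfuel _ pvBot ?_).2.2 s ?_ a b hrf
    · intro p q hpq; simp [pvBot] at hpq
    · exact (PySem.List.mem_pyRange_one).mpr (by omega)

-- ---------- incremental reachability: opening row t only adds cells reachable
-- ---------- from row-t seeds sitting on top of already-reached row-(t-1) cells ----------

theorem pvReach_incr (g : List (List Int)) (w t : Int) (ht : 1 ≤ t)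
    (v : Int → Int → Bool) (hv : ∀ a b, v a b = true ↔ pvReach g w t a b) (a b : Int) :
    pvReach g w (t + 1) a b ↔
      pvReach g w t a b ∨ ∃ x0 : Int, (0 ≤ x0 ∧ x0 < w) ∧ v x0 (t - 1) = true ∧
        pvRF (pvOk g w (t + 1) v) x0 t a b := by
  have hvf : ∀ p q, ¬ pvReach g w t p q → v p q = false := by
    intro p q hn
    cases hvpq : v p q
    · rfl
    · exact absurd ((hv p q).mp hvpq) hn
  constructor
  · rintro ⟨s, hs, hrf⟩
    induction hrf with
    | refl hok =>
        refine Or.inl ⟨s, hs, pvRF.refl ?_⟩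
        obtain ⟨⟨hb, hc⟩, _⟩ := hok
        exact ⟨⟨by omega, hc⟩, rfl⟩
    | step p q dd h hdd hok ih =>
        obtain ⟨d1, d2⟩ := dd
        simp only [Prod.fst, Prod.snd] at hok ⊢
        rcases ih with hold | hnew
        · by_cases hq : q + d2 < t
          · obtain ⟨s', hs', hrf'⟩ := hold
            refine Or.inl ⟨s', hs', ?_⟩
            have hstep := pvRF.step p q ((d1, d2)) hrf' hdd
              (ok := pvOk g w t pvBot) ?_
            · exact hstep
            · obtain ⟨⟨hb, hc⟩, _⟩ := hok
              exact ⟨⟨by omega, hc⟩, rfl⟩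
          · -- the step enters row t from row t-1 : a fresh seed
            have hb := hok.1.1
            have hbold := pvReach_bounds hold
            have hdd4 : (d1 = 1 ∧ d2 = 0) ∨ (d1 = 0 ∧ d2 = 1) ∨
                (d1 = -1 ∧ d2 = 0) ∨ (d1 = 0 ∧ d2 = -1) := by
              simpa [pvDirs, Prod.mk.injEq] using hdd
            have hd12 : d1 = 0 ∧ d2 = 1 := by
              rcases hdd4 with ⟨h1, h2⟩ | ⟨h1, h2⟩ | ⟨h1, h2⟩ | ⟨h1, h2⟩ <;> omega
            have hp : p + d1 = p := by omega
            have hqt : q + d2 = t := by omega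
            have hq1 : q = t - 1 := by omega
            rw [hp, hqt] at hok ⊢
            refine Or.inr ⟨p, ⟨by omega, by omega⟩, ?_, pvRF.refl ⟨hok.1, ?_⟩⟩
            · exact (hv p (t - 1)).mpr (by rw [← hq1]; exact hold)
            · exact hvf p t (fun hr => by have := pvReach_bounds hr; omega)
        · rcases hnew with ⟨x0, hx0, hvx0, hrf0⟩
          by_cases htar : pvReach g w t (p + d1) (q + d2)
          · exact Or.inl htar
          · refine Or.inr ⟨x0, hx0, hvx0, ?_⟩
            exact pvRF.step p q ((d1, d2)) hrf0 hdd ⟨hok.1, hvf _ _ htar⟩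
  · rintro (hold | ⟨x0, hx0, hvx0, hrf⟩)
    · exact pvReach_mono (by omega) hold
    · obtain ⟨s, hs, hrf1⟩ := (hv x0 (t - 1)).mp hvx0
      have hrf1' : pvRF (pvOk g w (t + 1) pvBot) s 0 x0 (t - 1) := by
        refine pvRF_mono ?_ hrf1
        rintro x y ⟨⟨hb, hc⟩, _⟩
        exact ⟨⟨by omega, hc⟩, rfl⟩
      have hrf' : pvRF (pvOk g w (t + 1) pvBot) x0 t a b := pvRF_mono pvOk_bot hrf
      have hokseed : pvOk g w (t + 1) pvBot x0 t := pvRF_source hrf'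
      have hstep : pvRF (pvOk g w (t + 1) pvBot) s 0 (x0 + ((0:Int),(1:Int)).1) ((t - 1) + ((0:Int),(1:Int)).2) := by
        refine pvRF.step x0 (t - 1) (((0 : Int), (1 : Int))) hrf1' (by simp [pvDirs]) ?_
        simpa using hokseed
      have hstep' : pvRF (pvOk g w (t + 1) pvBot) s 0 x0 t := by
        simpa using hstep
      exact ⟨s, hs, pvRF_trans hstep' hrf'⟩

-- ---------- fillB (B's stack flood fill) ----------

theorem pvFold_max_init {γ : Type} [DecidableEq γ] (S : Finset γ) (f : γ → Int) (n c : Int) :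
    S.fold max (max n c) f = max c (S.fold max n f) := by
  induction S using Finset.induction_on with
  | empty => simp [max_comm]
  | insert a s ha ih => rw [Finset.fold_insert ha, Finset.fold_insert ha, ih, max_left_comm]

-- cells newly visited by a fill step
def pvNew (w t : Int) (v V : Int → Int → Bool) : Finset (Int × Int) :=
  (pvCellsF w (t + 1)).filter (fun c => V c.1 c.2 = true ∧ v c.1 c.2 = false)

theorem fillB_succ_nil (g : List (List Int)) (w t : Int) (n : Nat) (st : (Int → Int → Bool) × Int) :
    fillB g w t (n + 1) [] st = st := rfl

theorem fillB_succ_guard (g : List (List Int)) (w t : Int) (n : Nat) (x y : Int)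
    (rest : List (Int × Int)) (v : Int → Int → Bool) (need : Int)
    (h1 : ¬(0 ≤ x ∧ x < w ∧ 0 ≤ y ∧ y ≤ t)) :
    fillB g w t (n + 1) ((x, y) :: rest) (v, need) = fillB g w t n rest (v, need) := by
  simp only [fillB]; rw [if_pos h1]

theorem fillB_succ_stop (g : List (List Int)) (w t : Int) (n : Nat) (x y : Int)
    (rest : List (Int × Int)) (v : Int → Int → Bool) (need : Int)
    (h1 : 0 ≤ x ∧ x < w ∧ 0 ≤ y ∧ y ≤ t) (h2 : pvCell g x y = 1 ∨ v x y = true) :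
    fillB g w t (n + 1) ((x, y) :: rest) (v, need) = fillB g w t n rest (v, need) := by
  simp only [fillB]; rw [if_neg (by tauto), if_pos h2]

theorem fillB_succ_mark (g : List (List Int)) (w t : Int) (n : Nat) (x y : Int)
    (rest : List (Int × Int)) (v : Int → Int → Bool) (need : Int)
    (h1 : 0 ≤ x ∧ x < w ∧ 0 ≤ y ∧ y ≤ t) (h2 : ¬(pvCell g x y = 1 ∨ v x y = true)) :
    fillB g w t (n + 1) ((x, y) :: rest) (v, need) =
      fillB g w t n (pvDirs.map (fun dd => (x + dd.1, y + dd.2)) ++ rest)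
        ((fun a b => decide (a = x ∧ b = y) || v a b), max need (t + 2 - y)) := by
  simp only [fillB]; rw [if_neg (by tauto), if_neg h2]

theorem fillB_main (g : List (List Int)) (w t : Int) :
    ∀ (fuel : Nat) (st : List (Int × Int)) (v : Int → Int → Bool) (need : Int),
      st.length + 4 * pvM w (t + 1) v + 1 ≤ fuel →
      pvVLE v (fillB g w t fuel st (v, need)).1
      ∧ (∀ a b, (fillB g w t fuel st (v, need)).1 a b = true →
          v a b = true ∨ ∃ s ∈ st, pvRF (pvOk g w (t + 1) v) s.1 s.2 a b)
      ∧ (∀ s ∈ st, pvGF g w (t + 1) s.1 s.2 → (fillB g w t fuel st (v, need)).1 s.1 s.2 = true)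
      ∧ (∀ a b, (fillB g w t fuel st (v, need)).1 a b = true → v a b = false →
          ∀ dd ∈ pvDirs, pvGF g w (t + 1) (a + dd.1) (b + dd.2) →
            (fillB g w t fuel st (v, need)).1 (a + dd.1) (b + dd.2) = true)
      ∧ (fillB g w t fuel st (v, need)).2
          = (pvNew w t v (fillB g w t fuel st (v, need)).1).fold max need (fun c => t + 2 - c.2) := by
  intro fuel
  induction fuel with
  | zero => intro st v need hf; omega
  | succ n ih =>
      intro st v need hf
      match st with
      | [] =>
          rw [fillB_succ_nil]
          refine ⟨pvVLE_refl v, fun a b h => Or.inl h,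
            fun s hs => absurd hs (List.not_mem_nil), fun a b h hv => absurd h (by simp [hv]), ?_⟩
          have : pvNew w t v v = ∅ := by
            ext c
            simp only [pvNew, Finset.mem_filter, Finset.notMem_empty, iff_false]
            rintro ⟨_, h1, h2⟩; rw [h1] at h2; cases h2
          rw [this, Finset.fold_empty]
      | (x, y) :: rest =>
          by_cases h1 : 0 ≤ x ∧ x < w ∧ 0 ≤ y ∧ y ≤ t
          · by_cases h2 : pvCell g x y = 1 ∨ v x y = true
            · rw [fillB_succ_stop g w t n x y rest v need h1 h2]
              have hf' : rest.length + 4 * pvM w (t + 1) v + 1 ≤ n := by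
                simp only [List.length_cons] at hf; omega
              obtain ⟨i', ii', iii', iv', v'⟩ := ih rest v need hf'
              refine ⟨i', ?_, ?_, iv', v'⟩
              · intro a b h
                rcases ii' a b h with hva | ⟨s, hs, hrf⟩
                · exact Or.inl hva
                · exact Or.inr ⟨s, List.mem_cons_of_mem _ hs, hrf⟩
              · intro s hs hgf
                rcases List.mem_cons.mp hs with rfl | hs'
                · rcases h2 with hc | hvx
                  · exact absurd hc hgf.2
                  · exact i' x y hvx
                · exact iii' s hs' hgf
            · rw [fillB_succ_mark g w t n x y rest v need h1 h2]
              push_neg at h2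
              have hvxy : v x y = false := by
                cases hvv : v x y
                · rfl
                · exact absurd hvv (by simpa using h2.2)
              have hok : pvOk g w (t + 1) v x y := ⟨⟨by omega, h2.1⟩, hvxy⟩
              have hmem : (x, y) ∈ pvCellsF w (t + 1) := pvCellsF_mem.mpr (by simp; omega)
              have hM1 : pvM w (t + 1) (fun a b => decide (a = x ∧ b = y) || v a b) + 1
                  = pvM w (t + 1) v := pvM_mark hmem hvxy
              have hlen : (pvDirs.map (fun dd => (x + dd.1, y + dd.2)) ++ rest).length
                  = 4 + rest.length := by simp [pvDirs]; omega
              have hf' : (pvDirs.map (fun dd => (x + dd.1, y + dd.2)) ++ rest).length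
                  + 4 * pvM w (t + 1) (fun a b => decide (a = x ∧ b = y) || v a b) + 1 ≤ n := by
                rw [hlen]
                simp only [List.length_cons] at hf
                omega
              obtain ⟨i', ii', iii', iv', v'⟩ :=
                ih (pvDirs.map (fun dd => (x + dd.1, y + dd.2)) ++ rest)
                  (fun a b => decide (a = x ∧ b = y) || v a b) (max need (t + 2 - y)) hf'
              have hvle1 : pvVLE v (fun a b => decide (a = x ∧ b = y) || v a b) :=
                fun a b h => by simp [h]
              refine ⟨pvVLE_trans hvle1 i', ?_, ?_, ?_, ?_⟩
              · -- soundness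
                intro a b h
                rcases ii' a b h with hv1 | ⟨s, hs, hrf⟩
                · simp only [Bool.or_eq_true, decide_eq_true_eq] at hv1
                  rcases hv1 with ⟨rfl, rfl⟩ | hva
                  · exact Or.inr ⟨(a, b), List.mem_cons_self, pvRF.refl hok⟩
                  · exact Or.inl hva
                · have hrf' := pvRF_mono (pvOk_mono hvle1) hrf
                  rcases List.mem_append.mp hs with hmap | hrest
                  · obtain ⟨dd, hdd, rfl⟩ := List.mem_map.mp hmap
                    exact Or.inr ⟨(x, y), List.mem_cons_self,
                      pvRF_graft dd hok hdd hrf'⟩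
                  · exact Or.inr ⟨s, List.mem_cons_of_mem _ hrest, hrf'⟩
              · -- starts
                intro s hs hgf
                rcases List.mem_cons.mp hs with rfl | hs'
                · exact i' x y (by simp)
                · exact iii' s (List.mem_append_right _ hs') hgf
              · -- closedness
                intro a b h hvab dd hdd hgf
                by_cases hv1 : (decide (a = x ∧ b = y) || v a b) = true
                · simp only [Bool.or_eq_true, decide_eq_true_eq] at hv1
                  rcases hv1 with ⟨rfl, rfl⟩ | hva
                  · refine iii' (a + dd.1, b + dd.2) ?_ hgf
                    exact List.mem_append_left _ (List.mem_map.mpr ⟨dd, hdd, rfl⟩)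
                  · rw [hva] at hvab; cases hvab
                · exact iv' a b h (by simpa using hv1) dd hdd hgf
              · -- the need accumulator
                rw [v']
                have hR1 : (fillB g w t n (pvDirs.map (fun dd => (x + dd.1, y + dd.2)) ++ rest)
                    ((fun a b => decide (a = x ∧ b = y) || v a b), max need (t + 2 - y))).1 x y = true :=
                  i' x y (by simp)
                have hkey : pvNew w t v (fillB g w t n (pvDirs.map (fun dd => (x + dd.1, y + dd.2)) ++ rest)
                      ((fun a b => decide (a = x ∧ b = y) || v a b), max need (t + 2 - y))).1
                    = insert (x, y) (pvNew w t (fun a b => decide (a = x ∧ b = y) || v a b)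
                      (fillB g w t n (pvDirs.map (fun dd => (x + dd.1, y + dd.2)) ++ rest)
                        ((fun a b => decide (a = x ∧ b = y) || v a b), max need (t + 2 - y))).1) := by
                  ext c
                  obtain ⟨c1, c2⟩ := c
                  simp only [pvNew, Finset.mem_filter, Finset.mem_insert, Prod.mk.injEq]
                  constructor
                  · rintro ⟨hcm, hcR, hcv⟩
                    by_cases hc : c1 = x ∧ c2 = y
                    · exact Or.inl hc
                    · refine Or.inr ⟨hcm, hcR, ?_⟩
                      simp only [Bool.or_eq_false_iff, decide_eq_false_iff_not]
                      exact ⟨hc, hcv⟩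
                  · rintro (⟨rfl, rfl⟩ | ⟨hcm, hcR, hcv⟩)
                    · exact ⟨hmem, hR1, hvxy⟩
                    · simp only [Bool.or_eq_false_iff, decide_eq_false_iff_not] at hcv
                      exact ⟨hcm, hcR, hcv.2⟩
                have hnot : (x, y) ∉ pvNew w t (fun a b => decide (a = x ∧ b = y) || v a b)
                    (fillB g w t n (pvDirs.map (fun dd => (x + dd.1, y + dd.2)) ++ rest)
                      ((fun a b => decide (a = x ∧ b = y) || v a b), max need (t + 2 - y))).1 := by
                  simp [pvNew, Finset.mem_filter]
                rw [hkey, Finset.fold_insert hnot, pvFold_max_init]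
          · rw [fillB_succ_guard g w t n x y rest v need h1]
            have hf' : rest.length + 4 * pvM w (t + 1) v + 1 ≤ n := by
              simp only [List.length_cons] at hf; omega
            obtain ⟨i', ii', iii', iv', v'⟩ := ih rest v need hf'
            refine ⟨i', ?_, ?_, iv', v'⟩
            · intro a b h
              rcases ii' a b h with hva | ⟨s, hs, hrf⟩
              · exact Or.inl hva
              · exact Or.inr ⟨s, List.mem_cons_of_mem _ hs, hrf⟩
            · intro s hs hgf
              rcases List.mem_cons.mp hs with rfl | hs'
              · obtain ⟨⟨h0, h1', h2', h3'⟩, _⟩ := hgf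
                exact absurd ⟨h0, h1', h2', by omega⟩ h1
              · exact iii' s hs' hgf

theorem fillB_visited_iff (g : List (List Int)) (w t : Int) (fuel : Nat)
    (st : List (Int × Int)) (v : Int → Int → Bool) (need : Int)
    (hf : st.length + 4 * pvM w (t + 1) v + 1 ≤ fuel) (a b : Int) :
    (fillB g w t fuel st (v, need)).1 a b = true ↔
      v a b = true ∨ ∃ s ∈ st, pvRF (pvOk g w (t + 1) v) s.1 s.2 a b := by
  obtain ⟨i, ii, iii, iv, _⟩ := fillB_main g w t fuel st v need hf
  constructor
  · exact ii a b
  · rintro (hva | ⟨s, hs, hrf⟩)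
    · exact i a b hva
    · induction hrf with
      | refl hok => exact iii s hs hok.1
      | step p q dd h hdd hok ih => exact iv p q ih (pvRF_target h).2 dd hdd hok.1

theorem fillB_need (g : List (List Int)) (w t : Int) (fuel : Nat)
    (st : List (Int × Int)) (v : Int → Int → Bool) (need : Int)
    (hf : st.length + 4 * pvM w (t + 1) v + 1 ≤ fuel) :
    (fillB g w t fuel st (v, need)).2
      = (pvNew w t v (fillB g w t fuel st (v, need)).1).fold max need (fun c => t + 2 - c.2) :=
  (fillB_main g w t fuel st v need hf).2.2.2.2


-- ---------- A's mins/need_v rescan, flattened and characterized ----------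

def pvScanList (L w : Int) : List (Int × Int) :=
  (PySem.List.pyRange 0 L 1).flatMap (fun y => (PySem.List.pyRange 0 w 1).map (fun x => (x, y)))

theorem foldl_foldl_flatten {α β γ : Type} (F : α → γ × β → α) (l1 : List β) (l2 : List γ)
    (init : α) :
    l1.foldl (fun st y => l2.foldl (fun st x => F st (x, y)) st) init
      = (l1.flatMap (fun y => l2.map (fun x => (x, y)))).foldl F init := by
  induction l1 generalizing init with
  | nil => rfl
  | cons y l1 ih =>
      simp only [List.flatMap_cons, List.foldl_append, List.foldl_map, List.foldl_cons]
      rw [ih]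

theorem pvScanList_eq (L w : Int) :
    pvScanList L w
      = ((PySem.List.pyRange 0 L 1) ×ˢ (PySem.List.pyRange 0 w 1)).map (fun p => (p.2, p.1)) := by
  simp only [pvScanList, SProd.sprod, List.product, List.map_flatMap]
  congr 1
  funext y
  simp [List.map_map, Function.comp]

theorem pvScanList_nodup (L w : Int) : (pvScanList L w).Nodup := by
  rw [pvScanList_eq]
  refine List.Nodup.map ?_ (List.Nodup.product (PySem.List.nodup_pyRange_one _ _)
    (PySem.List.nodup_pyRange_one _ _))
  rintro ⟨a, b⟩ ⟨c, d⟩ h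
  simp only [Prod.mk.injEq] at h
  exact Prod.ext h.2 h.1

theorem pvScanList_mem {L w : Int} {c : Int × Int} :
    c ∈ pvScanList L w ↔ 0 ≤ c.1 ∧ c.1 < w ∧ 0 ≤ c.2 ∧ c.2 < L := by
  obtain ⟨a, b⟩ := c
  simp only [pvScanList, List.mem_flatMap, List.mem_map, PySem.List.mem_pyRange_one,
    Prod.mk.injEq]
  constructor
  · rintro ⟨y, hy, x, hx, rfl, rfl⟩
    omega
  · rintro ⟨h1, h2, h3, h4⟩
    exact ⟨b, by omega, a, by omega, rfl, rfl⟩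

theorem scan_m (P : Int → Int → Bool) (L : Int) (hL : 1 ≤ L) :
    ∀ (cl : List (Int × Int)), cl.Nodup → ∀ (m : Int → Int → Int) (nv : Int) (b a : Int),
      (cl.foldl (fun (st3 : (Int → Int → Int) × Int) c =>
        if P c.1 c.2 = true ∧ st3.1 c.2 c.1 < 0 then
          ((fun b a => if b = c.2 ∧ a = c.1 then L else st3.1 b a), max st3.2 (L - c.2 + 1))
        else st3) (m, nv)).1 b a
      = if (a, b) ∈ cl ∧ P a b = true ∧ m b a < 0 then L else m b a := by
  intro cl
  induction cl with
  | nil => intro _ m nv b a; simp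
  | cons c cl ih =>
      obtain ⟨c1, c2⟩ := c
      intro hnd m nv b a
      have hcnotin : (c1, c2) ∉ cl := (List.nodup_cons.mp hnd).1
      have hnd' := (List.nodup_cons.mp hnd).2
      simp only [List.foldl_cons]
      try dsimp only
      by_cases hcond : P c1 c2 = true ∧ m c2 c1 < 0
      · rw [if_pos hcond, ih hnd']
        by_cases hc : a = c1 ∧ b = c2
        · obtain ⟨ha, hb⟩ := hc
          have hmem : ((a, b) : Int × Int) ∈ (c1, c2) :: cl := by
            rw [ha, hb]; exact List.mem_cons_self
          have hcond2 : P a b = true ∧ m b a < 0 := by rw [ha, hb]; exact hcond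
          have hinner : (if b = c2 ∧ a = c1 then L else m b a) = L := if_pos ⟨hb, ha⟩
          rw [hinner, ite_self, if_pos ⟨hmem, hcond2⟩]
        · have hpair : ¬((a, b) = ((c1, c2) : Int × Int)) := by
            intro hh
            injection hh with h1 h2
            exact hc ⟨h1, h2⟩
          have hinner : (if b = c2 ∧ a = c1 then L else m b a) = m b a :=
            if_neg (fun hh => hc ⟨hh.2, hh.1⟩)
          rw [hinner]
          by_cases hin : (a, b) ∈ cl ∧ P a b = true ∧ m b a < 0
          · rw [if_pos hin, if_pos ⟨List.mem_cons_of_mem _ hin.1, hin.2⟩]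
          · rw [if_neg hin,
              if_neg (fun hh => hin ⟨(List.mem_cons.mp hh.1).resolve_left hpair, hh.2⟩)]
      · rw [if_neg hcond, ih hnd']
        by_cases hc : a = c1 ∧ b = c2
        · have h1 : c1 = a := hc.1.symm
          have h2 : c2 = b := hc.2.symm
          subst h1; subst h2
          rw [if_neg (fun hh => hcnotin hh.1), if_neg (fun hh => hcond ⟨hh.2.1, hh.2.2⟩)]
        · have hpair : ¬((a, b) = ((c1, c2) : Int × Int)) := by
            intro hh
            injection hh with h1 h2
            exact hc ⟨h1, h2⟩
          by_cases hin : (a, b) ∈ cl ∧ P a b = true ∧ m b a < 0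
          · rw [if_pos hin, if_pos ⟨List.mem_cons_of_mem _ hin.1, hin.2⟩]
          · rw [if_neg hin,
              if_neg (fun hh => hin ⟨(List.mem_cons.mp hh.1).resolve_left hpair, hh.2⟩)]

theorem scan_need (P : Int → Int → Bool) (L : Int) (hL : 1 ≤ L) :
    ∀ (cl : List (Int × Int)), cl.Nodup → ∀ (m : Int → Int → Int) (nv : Int),
      (cl.foldl (fun (st3 : (Int → Int → Int) × Int) c =>
        if P c.1 c.2 = true ∧ st3.1 c.2 c.1 < 0 then
          ((fun b a => if b = c.2 ∧ a = c.1 then L else st3.1 b a), max st3.2 (L - c.2 + 1))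
        else st3) (m, nv)).2
      = ((cl.filter (fun c => P c.1 c.2 = true ∧ m c.2 c.1 < 0)).toFinset.fold max nv
          (fun c => L - c.2 + 1)) := by
  intro cl
  induction cl with
  | nil => intro _ m nv; simp
  | cons c cl ih =>
      obtain ⟨c1, c2⟩ := c
      intro hnd m nv
      have hcnotin : (c1, c2) ∉ cl := (List.nodup_cons.mp hnd).1
      have hnd' := (List.nodup_cons.mp hnd).2
      simp only [List.foldl_cons]
      try dsimp only
      by_cases hcond : P c1 c2 = true ∧ m c2 c1 < 0
      · rw [if_pos hcond, ih hnd']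
        try dsimp only
        have hstep' : cl.filter
              (fun c' => decide (P c'.1 c'.2 = true ∧
                (if c'.2 = c2 ∧ c'.1 = c1 then L else m c'.2 c'.1) < 0))
            = cl.filter (fun c' => decide (P c'.1 c'.2 = true ∧ m c'.2 c'.1 < 0)) := by
          refine List.filter_congr (fun c' hc' => ?_)
          have hne : ¬(c'.2 = c2 ∧ c'.1 = c1) := by
            rintro ⟨hh2, hh1⟩
            have hceq : c' = ((c1, c2) : Int × Int) := Prod.ext hh1 hh2
            exact hcnotin (hceq ▸ hc')
          rw [if_neg hne]
        rw [hstep']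
        rw [List.filter_cons, if_pos (by simp [hcond])]
        have hctf : ((c1, c2) : Int × Int) ∉
            (cl.filter (fun c' => decide (P c'.1 c'.2 = true ∧ m c'.2 c'.1 < 0))).toFinset := by
          simp only [List.mem_toFinset, List.mem_filter]
          rintro ⟨hmem, _⟩
          exact hcnotin hmem
        rw [List.toFinset_cons, Finset.fold_insert hctf, pvFold_max_init]
      · rw [if_neg hcond, ih hnd', List.filter_cons, if_neg (by simp [hcond])]

-- A's per-ylimit visited array
def pvVisA (g : List (List Int)) (w L : Int) (fuel : Nat) : Int → Int → Bool :=
  (PySem.List.pyRange 0 w 1).foldl (fun v x => paintA g w L fuel x 0 v) (fun _ _ => false)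

theorem pvVisA_iff (g : List (List Int)) (w L : Int) (fuel : Nat)
    (hfuel : w.toNat * L.toNat + 1 ≤ fuel) (a b : Int) :
    pvVisA g w L fuel a b = true ↔ pvReach g w L a b :=
  foldA_charac g w L fuel hfuel a b

-- the whole body of one iteration of A's outer loop
def pvStepA (g : List (List Int)) (w : Int) (fuel : Nat) (st : (Int → Int → Int) × Int)
    (ylimit : Int) : (Int → Int → Int) × Int :=
  let visited := (PySem.List.pyRange 0 w 1).foldl
    (fun v x => paintA g w ylimit fuel x 0 v) (fun _ _ => false)
  (PySem.List.pyRange 0 ylimit 1).foldl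
    (fun st2 y => (PySem.List.pyRange 0 w 1).foldl
      (fun (st3 : (Int → Int → Int) × Int) x =>
        if visited x y = true ∧ st3.1 y x < 0 then
          ((fun b a => if b = y ∧ a = x then ylimit else st3.1 b a),
           max st3.2 (ylimit - y + 1))
        else st3) st2) st

theorem pvStepA_fold (g : List (List Int)) (w L : Int) (fuel : Nat)
    (m : Int → Int → Int) (nv : Int) :
    pvStepA g w fuel (m, nv) L
      = (pvScanList L w).foldl (fun (st3 : (Int → Int → Int) × Int) c =>
          if pvVisA g w L fuel c.1 c.2 = true ∧ st3.1 c.2 c.1 < 0 then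
            ((fun b a => if b = c.2 ∧ a = c.1 then L else st3.1 b a),
             max st3.2 (L - c.2 + 1))
          else st3) (m, nv) :=
  foldl_foldl_flatten
    (F := fun (st3 : (Int → Int → Int) × Int) (c : Int × Int) =>
      if pvVisA g w L fuel c.1 c.2 = true ∧ st3.1 c.2 c.1 < 0 then
        ((fun b a => if b = c.2 ∧ a = c.1 then L else st3.1 b a), max st3.2 (L - c.2 + 1))
      else st3)
    (PySem.List.pyRange 0 L 1) (PySem.List.pyRange 0 w 1) (m, nv)

theorem pvStepA_m (g : List (List Int)) (w L : Int) (fuel : Nat) (hL : 1 ≤ L)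
    (m : Int → Int → Int) (nv : Int) (b a : Int) :
    (pvStepA g w fuel (m, nv) L).1 b a
      = if ((a, b) ∈ pvScanList L w ∧ pvVisA g w L fuel a b = true ∧ m b a < 0)
        then L else m b a := by
  rw [pvStepA_fold]
  exact scan_m (pvVisA g w L fuel) L hL (pvScanList L w) (pvScanList_nodup L w) m nv b a

theorem pvStepA_need (g : List (List Int)) (w L : Int) (fuel : Nat) (hL : 1 ≤ L)
    (m : Int → Int → Int) (nv : Int) :
    (pvStepA g w fuel (m, nv) L).2
      = ((pvScanList L w).filter
          (fun c => pvVisA g w L fuel c.1 c.2 = true ∧ m c.2 c.1 < 0)).toFinset.fold max nv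
          (fun c => L - c.2 + 1) := by
  rw [pvStepA_fold]
  exact scan_need (pvVisA g w L fuel) L hL (pvScanList L w) (pvScanList_nodup L w) m nv


-- ---------- one iteration of B's outer loop, and the joint outer induction ----------

def pvStepB (g : List (List Int)) (w : Int) (fuel : Nat) (st : (Int → Int → Bool) × Int)
    (t : Int) : (Int → Int → Bool) × Int :=
  let stack := if t = 0 then (PySem.List.pyRange 0 w 1).map (fun x => (x, (0 : Int)))
    else ((PySem.List.pyRange 0 w 1).filter (fun x => st.1 x (t - 1))).map (fun x => (x, t))
  fillB g w t fuel stack st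

theorem block_goback_eq (block : List (List Int)) :
    block_goback block
      = ((PySem.List.pyRange 1 (block.length : Int) 1).foldl
          (pvStepA block.reverse ((block.headD []).length : Int)
            (((block.headD []).length : Int).toNat * ((block.length : Int)).toNat + 1))
          ((fun _ _ => (-1 : Int)), (0 : Int))).2 := rfl

theorem block_goback_alt_eq (block : List (List Int)) :
    block_goback_alt block
      = ((PySem.List.pyRange 0 ((block.length : Int) - 1) 1).foldl
          (pvStepB block.reverse ((block.headD []).length : Int)
            (5 * (((block.headD []).length : Int).toNat * ((block.length : Int)).toNat)
              + ((block.headD []).length : Int).toNat + 1))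
          ((fun _ _ => false), (0 : Int))).2 := rfl

theorem pvOuter (g : List (List Int)) (w : Int) (hw : 0 ≤ w) (fa fb : Nat) (N : Nat)
    (hfa : ∀ L : Int, 1 ≤ L → L ≤ (N : Int) → w.toNat * L.toNat + 1 ≤ fa)
    (hfb : ∀ t : Int, 0 ≤ t → t < (N : Int) → w.toNat + 4 * (w.toNat * (t + 1).toNat) + 1 ≤ fb) :
    ∀ n : Nat, n ≤ N →
      (∀ a b, (0 ≤ ((PySem.List.pyRange 1 ((n : Int) + 1) 1).foldl (pvStepA g w fa)
          ((fun _ _ => (-1 : Int)), (0 : Int))).1 b a ↔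
        ((PySem.List.pyRange 0 ((n : Int)) 1).foldl (pvStepB g w fb)
          ((fun _ _ => false), (0 : Int))).1 a b = true))
      ∧ (∀ a b, (((PySem.List.pyRange 0 ((n : Int)) 1).foldl (pvStepB g w fb)
          ((fun _ _ => false), (0 : Int))).1 a b = true ↔ pvReach g w ((n : Int)) a b))
      ∧ ((PySem.List.pyRange 1 ((n : Int) + 1) 1).foldl (pvStepA g w fa)
          ((fun _ _ => (-1 : Int)), (0 : Int))).2
        = ((PySem.List.pyRange 0 ((n : Int)) 1).foldl (pvStepB g w fb)
          ((fun _ _ => false), (0 : Int))).2 := by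
  intro n
  induction n with
  | zero =>
      intro _
      rw [show ((0 : Nat) : Int) + 1 = 1 by norm_num,
        PySem.List.pyRange_one_eq_nil (by norm_num : (1 : Int) ≤ 1),
        show ((0 : Nat) : Int) = 0 by norm_num,
        PySem.List.pyRange_one_eq_nil (by norm_num : (0 : Int) ≤ 0)]
      simp only [List.foldl_nil]
      refine ⟨?_, ?_, by trivial⟩
      · intro a b
        constructor
        · intro h; omega
        · intro h; cases h
      · intro a b
        constructor
        · intro h; cases h
        · intro h; exact absurd h pvReach_zero
  | succ n ihn =>
      intro hn1
      have hn : n ≤ N := by omega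
      obtain ⟨ih1, ih2, ih3⟩ := ihn hn
      push_cast
      rw [PySem.List.pyRange_one_succ_right (by omega : (1 : Int) ≤ (n : Int) + 1),
        PySem.List.pyRange_one_succ_right (by omega : (0 : Int) ≤ (n : Int))]
      simp only [List.foldl_append, List.foldl_cons, List.foldl_nil]
      set SA := (PySem.List.pyRange 1 ((n : Int) + 1) 1).foldl (pvStepA g w fa)
        ((fun _ _ => (-1 : Int)), (0 : Int)) with hSA
      set SB := (PySem.List.pyRange 0 ((n : Int)) 1).foldl (pvStepB g w fb)
        ((fun _ _ => false), (0 : Int)) with hSB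
      obtain ⟨mA, nA⟩ := SA
      obtain ⟨vB, nB⟩ := SB
      have ih1' : ∀ a b : Int, 0 ≤ mA b a ↔ vB a b = true := ih1
      have ih2' : ∀ a b : Int, vB a b = true ↔ pvReach g w ((n : Int)) a b := ih2
      have ih3' : nA = nB := ih3
      have hfa' : w.toNat * ((n : Int) + 1).toNat + 1 ≤ fa := hfa ((n : Int) + 1) (by omega) (by omega)
      have hVis : ∀ a b, pvVisA g w ((n : Int) + 1) fa a b = true ↔ pvReach g w ((n : Int) + 1) a b :=
        fun a b => pvVisA_iff g w ((n : Int) + 1) fa hfa' a b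
      set stk := if ((n : Int)) = 0 then (PySem.List.pyRange 0 w 1).map (fun x => (x, (0 : Int)))
        else ((PySem.List.pyRange 0 w 1).filter (fun x => vB x ((n : Int) - 1))).map
          (fun x => (x, ((n : Int)))) with hstk
      have hstepB : pvStepB g w fb (vB, nB) ((n : Int)) = fillB g w ((n : Int)) fb stk (vB, nB) := rfl
      have hstklen : stk.length ≤ w.toNat := by
        rw [hstk]
        split_ifs
        · simp only [List.length_map, PySem.List.length_pyRange_one]
          omega
        · simp only [List.length_map]
          refine le_trans (List.length_filter_le _ _) ?_
          simp only [PySem.List.length_pyRange_one]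
          omega
      have hfb' : stk.length + 4 * pvM w ((n : Int) + 1) vB + 1 ≤ fb := by
        have h1 := pvM_le (w := w) (d := (n : Int) + 1) vB
        have h2 := hfb ((n : Int)) (by omega) (by omega)
        omega
      have hBvis := fillB_visited_iff g w ((n : Int)) fb stk vB nB hfb'
      have hBneed := fillB_need g w ((n : Int)) fb stk vB nB hfb'
      have hBiff : ∀ a b, (fillB g w ((n : Int)) fb stk (vB, nB)).1 a b = true ↔
          pvReach g w ((n : Int) + 1) a b := by
        intro a b
        rw [hBvis a b]
        by_cases hn0 : ((n : Int)) = 0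
        · have hvBfalse : ∀ p q, vB p q = false := by
            intro p q
            cases hv : vB p q
            · rfl
            · have := (ih2' p q).mp hv
              rw [hn0] at this
              exact absurd this pvReach_zero
          rw [hstk, if_pos hn0]
          constructor
          · rintro (hv | ⟨s, hs, hrf⟩)
            · rw [hvBfalse] at hv; cases hv
            · obtain ⟨x, hx, rfl⟩ := List.mem_map.mp hs
              have hxb := (PySem.List.mem_pyRange_one).mp hx
              exact ⟨x, by omega, pvRF_mono pvOk_bot hrf⟩
          · rintro ⟨s, hs, hrf⟩
            have hsrc := pvRF_source hrf
            refine Or.inr ⟨(s, 0), List.mem_map.mpr ⟨s,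
              (PySem.List.mem_pyRange_one).mpr (by omega), rfl⟩, ?_⟩
            refine pvRF_mono ?_ hrf
            rintro x y ⟨hgf, _⟩
            exact ⟨hgf, hvBfalse x y⟩
        · have ht1 : 1 ≤ (n : Int) := by
            have : 0 ≤ (n : Int) := by omega
            omega
          rw [hstk, if_neg hn0]
          rw [pvReach_incr g w ((n : Int)) ht1 vB ih2' a b]
          constructor
          · rintro (hv | ⟨s, hs, hrf⟩)
            · exact Or.inl ((ih2' a b).mp hv)
            · obtain ⟨x, hxmem, rfl⟩ := List.mem_map.mp hs
              obtain ⟨hxr, hxv⟩ := List.mem_filter.mp hxmem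
              have hxb := (PySem.List.mem_pyRange_one).mp hxr
              exact Or.inr ⟨x, by omega, hxv, hrf⟩
          · rintro (hold | ⟨x0, hx0, hvx0, hrf⟩)
            · exact Or.inl ((ih2' a b).mpr hold)
            · exact Or.inr ⟨(x0, (n : Int)), List.mem_map.mpr ⟨x0,
                List.mem_filter.mpr ⟨(PySem.List.mem_pyRange_one).mpr (by omega), hvx0⟩, rfl⟩, hrf⟩
      refine ⟨?_, ?_, ?_⟩
      · intro a b
        rw [pvStepA_m g w ((n : Int) + 1) fa (by omega) mA nA b a, hstepB]
        constructor
        · intro h0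
          by_cases hcnd : ((a, b) ∈ pvScanList ((n : Int) + 1) w
              ∧ pvVisA g w ((n : Int) + 1) fa a b = true ∧ mA b a < 0)
          · exact (hBiff a b).mpr ((hVis a b).mp hcnd.2.1)
          · rw [if_neg hcnd] at h0
            exact (hBiff a b).mpr (pvReach_mono (by omega) ((ih2' a b).mp ((ih1' a b).mp h0)))
        · intro hB
          have hr : pvReach g w ((n : Int) + 1) a b := (hBiff a b).mp hB
          have hbounds := pvReach_bounds hr
          have hvis : pvVisA g w ((n : Int) + 1) fa a b = true := (hVis a b).mpr hr
          have hmem : (a, b) ∈ pvScanList ((n : Int) + 1) w :=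
            pvScanList_mem.mpr (by simpa using hbounds)
          by_cases hm : mA b a < 0
          · rw [if_pos ⟨hmem, hvis, hm⟩]; omega
          · rw [if_neg (fun hh => hm hh.2.2)]; omega
      · intro a b
        rw [hstepB]
        exact hBiff a b
      · rw [pvStepA_need g w ((n : Int) + 1) fa (by omega) mA nA, hstepB, hBneed, ih3']
        have hsets : ((pvScanList ((n : Int) + 1) w).filter
              (fun c => pvVisA g w ((n : Int) + 1) fa c.1 c.2 = true ∧ mA c.2 c.1 < 0)).toFinset
            = pvNew w ((n : Int)) vB (fillB g w ((n : Int)) fb stk (vB, nB)).1 := by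
          ext c
          obtain ⟨a, b⟩ := c
          simp only [List.mem_toFinset, List.mem_filter, pvNew, Finset.mem_filter,
            decide_eq_true_eq]
          constructor
          · rintro ⟨hmem, hvis, hm⟩
            have hb := pvScanList_mem.mp hmem
            have hr := (hVis a b).mp hvis
            refine ⟨pvCellsF_mem.mpr (by simpa using hb), (hBiff a b).mpr hr, ?_⟩
            cases hvb : vB a b
            · rfl
            · exact absurd ((ih1' a b).mpr hvb) (by omega)
          · rintro ⟨hcell, hV, hvb⟩
            have hr := (hBiff a b).mp hV
            have hbou := pvReach_bounds hr
            refine ⟨pvScanList_mem.mpr (by simpa using hbou), (hVis a b).mpr hr, ?_⟩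
            have hnot : ¬ (0 ≤ mA b a) := fun h0 => by rw [(ih1' a b).mp h0] at hvb; cases hvb
            omega
        rw [hsets]
        refine Finset.fold_congr ?_
        intro c hc
        omega

-- ===== VERDICT (by name: the statement is the Claim_ definition above) =====
theorem block_goback_spec : Claim_equal_block_goback := by
  unfold Claim_equal_block_goback
  intro block _hdom hpre
  unfold Spec_block_goback
  rw [block_goback_eq, block_goback_alt_eq]
  have hw : 0 ≤ (((block.headD []).length : Int)) := Int.natCast_nonneg _
  have hlen : 1 ≤ block.length := List.length_pos_iff.mpr hpre.1
  have hcast1 : (block.length : Int) = ((block.length - 1 : Nat) : Int) + 1 := by omega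
  rw [hcast1, show ((((block.length - 1 : Nat) : Int)) + 1 - 1) = ((block.length - 1 : Nat) : Int) by ring]
  refine (pvOuter block.reverse ((block.headD []).length : Int) hw _ _ (block.length - 1)
    ?_ ?_ (block.length - 1) (le_refl _)).2.2
  · intro L h1 h2
    have h3 : L.toNat ≤ (((block.length - 1 : Nat) : Int) + 1).toNat := by omega
    have h4 := Nat.mul_le_mul_left ((block.headD []).length : Int).toNat h3
    omega
  · intro t h1 h2
    have h3 : (t + 1).toNat ≤ (((block.length - 1 : Nat) : Int) + 1).toNat := by omega
    have h4 := Nat.mul_le_mul_left ((block.headD []).length : Int).toNat h3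
    omega
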